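-- pv_equiv track=rewrite | github.com/hwan129/CodingTest | 프로그래머스/0/181926. 수 조작하기 1/수 조작하기 1.py | solution
-- ===== SOURCE A (Python) =====
-- def solution(n, control):
--     answer = n
--
--     for i in range(len(control)):
--         if control[i] == 'w':
--             answer += 1
--         if control[i] == 's':
--             answer -= 1
--         if control[i] == 'd':
--             answer += 10
--         if control[i] == 'a':
--             answer -= 10
--
--     return answer
-- ===== SOURCE B (Python) =====
-- def solution(n, control):
--     return (n + control.count('w') - control.count('s')
--               + 10 * control.count('d') - 10 * control.count('a'))
-- ===== Notes on version B (the rewrite author's own statement) =====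
-- stated objective: simpler
-- what changed: Replaces the per-character branching loop with a closed-form arithmetic expression combining four independent str.count scans (one per control letter).
import Mathlib
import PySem

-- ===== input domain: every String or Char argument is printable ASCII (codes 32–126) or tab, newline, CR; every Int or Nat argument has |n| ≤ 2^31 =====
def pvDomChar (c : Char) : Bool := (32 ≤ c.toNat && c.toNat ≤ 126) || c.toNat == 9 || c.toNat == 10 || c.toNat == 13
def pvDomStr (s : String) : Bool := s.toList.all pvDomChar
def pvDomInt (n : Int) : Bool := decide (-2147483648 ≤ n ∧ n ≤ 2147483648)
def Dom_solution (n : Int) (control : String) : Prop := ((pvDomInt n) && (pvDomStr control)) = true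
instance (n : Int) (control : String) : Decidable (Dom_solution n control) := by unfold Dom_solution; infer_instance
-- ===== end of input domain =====

-- B replaces A's per-character branching loop with a closed-form expression over four str.count scans; objective: simpler.

-- ===== PORT A =====
-- one pass over the characters, four sequential (non-elif) conditional updates, as in A
def solution (n : Int) (control : String) : Int :=
  control.toList.foldl (fun answer c =>
    let answer := if c == 'w' then answer + 1 else answer
    let answer := if c == 's' then answer - 1 else answer
    let answer := if c == 'd' then answer + 10 else answer
    if c == 'a' then answer - 10 else answer) n

-- ===== PORT B =====
def solution_alt (n : Int) (control : String) : Int :=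
  n + (PySem.Str.count control "w" : Int) - (PySem.Str.count control "s" : Int)
    + 10 * (PySem.Str.count control "d" : Int) - 10 * (PySem.Str.count control "a" : Int)

-- ===== PRECONDITION & SPEC =====
def Spec_solution (n : Int) (control : String) (out : Int) : Prop := out = solution_alt n control
instance (n : Int) (control : String) (out : Int) : Decidable (Spec_solution n control out) := by unfold Spec_solution; infer_instance

-- ===== CLAIM (what is proved, stated in full; the proofs are below) =====
def Claim_equal_solution : Prop := ∀ (n : Int) (control : String), Dom_solution n control → Spec_solution n control (solution n control)

-- ===== LEMMAS AND PROOFS =====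

-- Python's str.count with a single-character needle is List.count on the characters
theorem chars_count_go_single (c : Char) :
    ∀ (l : List Char) (fuel acc : Nat), l.length ≤ fuel →
      PySem.Chars.count.go [c] fuel l acc = acc + l.count c := by
  intro l
  induction l with
  | nil => intro fuel acc _; cases fuel <;> simp [PySem.Chars.count.go]
  | cons h t ih =>
      intro fuel acc hf
      cases fuel with
      | zero => simp at hf
      | succ f =>
          by_cases hc : h = c
          · subst hc
            simp only [PySem.Chars.count.go, List.isPrefixOf, BEq.rfl, Bool.true_and, if_true,
              List.length_cons, List.drop_succ_cons,
              List.length_nil, List.drop_zero, List.count_cons_self]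
            rw [ih f (acc + 1) (by simpa using hf)]
            omega
          · have hpre : ([c].isPrefixOf (h :: t)) = false := by
              simp [List.isPrefixOf, Ne.symm hc]
            simp only [PySem.Chars.count.go, hpre, Bool.false_eq_true, if_false]
            rw [ih f acc (by simpa using hf), List.count_cons_of_ne hc]

theorem chars_count_single (s : List Char) (c : Char) :
    PySem.Chars.count s [c] = s.count c := by
  have h := chars_count_go_single c s s.length 0 le_rfl
  simpa [PySem.Chars.count, List.isEmpty] using h

theorem foldl_closed_form (l : List Char) (n : Int) :
    l.foldl (fun answer c =>
      let answer := if c == 'w' then answer + 1 else answer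
      let answer := if c == 's' then answer - 1 else answer
      let answer := if c == 'd' then answer + 10 else answer
      if c == 'a' then answer - 10 else answer) n
    = n + (l.count 'w' : Int) - (l.count 's' : Int)
        + 10 * (l.count 'd' : Int) - 10 * (l.count 'a' : Int) := by
  induction l generalizing n with
  | nil => simp
  | cons h t ih =>
      simp only [List.foldl_cons, ih]
      by_cases hw : h = 'w' <;> by_cases hs : h = 's' <;>
        by_cases hd : h = 'd' <;> by_cases ha : h = 'a' <;>
        simp_all <;> ring

-- ===== VERDICT (by name: the statement is the Claim_ definition above) =====
theorem solution_spec : Claim_equal_solution := by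
  intro n control _
  unfold Spec_solution solution solution_alt
  rw [foldl_closed_form]
  simp [PySem.Str.count_eq, chars_count_single]
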